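-- pv_equiv track=rewrite | github.com/vsdutraa/fraud-detection | ml-service/features/engineering.py | _categorize_merchant_risk
-- ===== SOURCE A (Python) =====
-- def _categorize_merchant_risk(merchant: str) -> int:
--     """Categorize merchant risk level (0=low, 1=medium, 2=high)"""
--     high_risk_keywords = ['crypto', 'gambling', 'casino', 'adult', 'pharmacy']
--     medium_risk_keywords = ['gas', 'atm', 'cash', 'transfer']
--
--     merchant_lower = merchant.lower()
--
--     for keyword in high_risk_keywords:
--         if keyword in merchant_lower:
--             return 2
--
--     for keyword in medium_risk_keywords:
--         if keyword in merchant_lower: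
--             return 1
--
--     return 0
-- ===== SOURCE B (Python) =====
-- def _categorize_merchant_risk(merchant: str) -> int:
--     """Categorize merchant risk level (0=low, 1=medium, 2=high)"""
--     keyword_levels = {
--         'crypto': 2, 'gambling': 2, 'casino': 2, 'adult': 2, 'pharmacy': 2,
--         'gas': 1, 'atm': 1, 'cash': 1, 'transfer': 1,
--     }
--     merchant_lower = merchant.lower()
--     return max((level for kw, level in keyword_levels.items() if kw in merchant_lower), default=0)
-- ===== Notes on version B (the rewrite author's own statement) =====
-- stated objective: simpler
-- what changed: Replaces the two ordered early-return keyword scans with a single keyword-to-level mapping and one accumulate-the-maximum pass (max with default 0), relying on 2>1>0 to preserve tier priority.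
import Mathlib
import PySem

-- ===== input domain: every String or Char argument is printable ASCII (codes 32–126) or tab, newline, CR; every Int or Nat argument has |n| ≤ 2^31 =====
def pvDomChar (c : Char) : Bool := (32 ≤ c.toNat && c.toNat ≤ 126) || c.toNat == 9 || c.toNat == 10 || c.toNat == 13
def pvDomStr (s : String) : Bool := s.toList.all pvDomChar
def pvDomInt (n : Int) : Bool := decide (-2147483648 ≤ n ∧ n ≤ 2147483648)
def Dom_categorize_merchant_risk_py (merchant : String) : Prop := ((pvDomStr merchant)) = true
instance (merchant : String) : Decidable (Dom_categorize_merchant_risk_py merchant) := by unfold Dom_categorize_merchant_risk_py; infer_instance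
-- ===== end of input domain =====

-- ===== PORT A =====
-- A: two ordered early-return scans over the high- and medium-risk keyword lists.

-- 'for keyword in kws: if keyword in merchant_lower: return r' — early return as Option
def pvScanA (kws : List String) (ml : String) (r : Int) : Option Int :=
  match kws with
  | [] => none
  | k :: rest => if PySem.Str.isIn k ml then some r else pvScanA rest ml r

def categorize_merchant_risk_py (merchant : String) : Int :=
  let high_risk_keywords : List String := ["crypto", "gambling", "casino", "adult", "pharmacy"]
  let medium_risk_keywords : List String := ["gas", "atm", "cash", "transfer"]
  let merchant_lower := PySem.Str.lower merchant
  match pvScanA high_risk_keywords merchant_lower 2 with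
  | some r => r
  | none =>
    match pvScanA medium_risk_keywords merchant_lower 1 with
    | some r => r
    | none => 0

-- ===== PORT B =====
-- B (objective: simpler): one keyword→level mapping, one pass collecting matched
-- levels, result = max of the matches with default 0.

def pvKeywordLevels : List (String × Int) :=
  [("crypto", 2), ("gambling", 2), ("casino", 2), ("adult", 2), ("pharmacy", 2),
   ("gas", 1), ("atm", 1), ("cash", 1), ("transfer", 1)]

def categorize_merchant_risk_py_alt (merchant : String) : Int :=
  let merchant_lower := PySem.Str.lower merchant
  (pvKeywordLevels.filterMap (fun p => if PySem.Str.isIn p.1 merchant_lower then some p.2 else none)).foldl max 0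

-- ===== PRECONDITION & SPEC =====
def Spec_categorize_merchant_risk_py (merchant : String) (out : Int) : Prop := out = categorize_merchant_risk_py_alt merchant
instance (merchant : String) (out : Int) : Decidable (Spec_categorize_merchant_risk_py merchant out) := by unfold Spec_categorize_merchant_risk_py; infer_instance

-- ===== CLAIM (what is proved, stated in full; the proofs are below) =====
def Claim_equal_categorize_merchant_risk_py : Prop := ∀ (merchant : String), Dom_categorize_merchant_risk_py merchant → Spec_categorize_merchant_risk_py merchant (categorize_merchant_risk_py merchant)

-- ===== LEMMAS AND PROOFS =====

-- A's early-return scan, consumed by a match, is an if-any chain.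
theorem pvScanA_match (kws : List String) (ml : String) (r e : Int) :
    (match pvScanA kws ml r with | some x => x | none => e)
      = if kws.any (fun k => PySem.Str.isIn k ml) then r else e := by
  induction kws with
  | nil => simp [pvScanA]
  | cons k rest ih =>
    cases hc : PySem.Chars.isIn k.toList ml.toList <;>
      simp [pvScanA, hc, ih]

-- B's filterMap-then-foldl-max is a single foldl with a conditional max step.
theorem pv_foldl_max_filterMap (l : List (String × Int)) (ml : String) (a : Int) :
    (l.filterMap (fun p => if PySem.Str.isIn p.1 ml then some p.2 else none)).foldl max a
      = l.foldl (fun acc p => if PySem.Str.isIn p.1 ml then max acc p.2 else acc) a := by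
  induction l generalizing a with
  | nil => rfl
  | cons p rest ih =>
    cases hc : PySem.Chars.isIn p.1.toList ml.toList
    · simp only [List.filterMap_cons, List.foldl_cons]
      simp [hc]
      exact ih a
    · simp only [List.filterMap_cons, List.foldl_cons]
      simp [hc]
      exact ih (max a p.2)

-- A conditional-max fold over pairs sharing one level v is 'max a v if any keyword matches'.
theorem pv_foldl_condmax (l : List (String × Int)) (v : Int) (ml : String) :
    (∀ p ∈ l, p.2 = v) → ∀ a : Int,
    l.foldl (fun acc p => if PySem.Str.isIn p.1 ml then max acc p.2 else acc) a
      = if l.any (fun p => PySem.Str.isIn p.1 ml) then max a v else a := by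
  induction l with
  | nil => intro _ a; simp
  | cons p rest ih =>
    intro hv a
    have hp : p.2 = v := hv p (List.mem_cons_self ..)
    have hrest : ∀ q ∈ rest, q.2 = v := fun q hq => hv q (List.mem_cons_of_mem _ hq)
    cases hc : PySem.Chars.isIn p.1.toList ml.toList
    · rw [List.foldl_cons]
      have hstep0 : (if PySem.Str.isIn p.1 ml then max a p.2 else a) = a := by simp [hc]
      rw [hstep0, ih hrest a]
      have hany : ((p :: rest).any fun q => PySem.Str.isIn q.1 ml)
          = (rest.any fun q => PySem.Str.isIn q.1 ml) := by
        rw [List.any_cons, show PySem.Str.isIn p.1 ml = false from hc, Bool.false_or]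
      rw [hany]
    · rw [List.foldl_cons]
      have hstep : (if PySem.Str.isIn p.1 ml then max a p.2 else a) = max a v := by
        simp [hc, hp]
      rw [hstep, ih hrest (max a v)]
      simp [hc]

-- ===== VERDICT (by name: the statement is the Claim_ definition above) =====
theorem categorize_merchant_risk_py_spec : Claim_equal_categorize_merchant_risk_py := by
  intro m _
  unfold Spec_categorize_merchant_risk_py categorize_merchant_risk_py categorize_merchant_risk_py_alt pvKeywordLevels
  rw [pv_foldl_max_filterMap]
  rw [show ([("crypto", (2:Int)), ("gambling", 2), ("casino", 2), ("adult", 2), ("pharmacy", 2),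
        ("gas", 1), ("atm", 1), ("cash", 1), ("transfer", 1)] : List (String × Int))
      = [("crypto", 2), ("gambling", 2), ("casino", 2), ("adult", 2), ("pharmacy", 2)] ++
        [("gas", 1), ("atm", 1), ("cash", 1), ("transfer", 1)] from rfl,
      List.foldl_append]
  rw [pv_foldl_condmax _ 2 _ (by decide) 0, pv_foldl_condmax _ 1 _ (by decide)]
  rw [pvScanA_match, pvScanA_match]
  simp only [List.any_cons, List.any_nil, PySem.Str.isIn, Bool.or_false]
  split_ifs <;> simp_all
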